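-- pv_equiv track=rewrite | github.com/clusslin/Rad-Loinc | src/description_parser.py | identify_primary_modality
-- ===== SOURCE A (Python) =====
-- from typing import Dict, List, Optional, Tuple
--
-- def identify_primary_modality(modality_list: List[str]) -> str:
--     """
--     Identify primary modality from a list
--     Priority: CT > MR > US > XA > RF > CR
--     """
--     if not modality_list:
--         return ""
--
--     priority_order = ['CT', 'MR', 'US', 'XA', 'RF', 'CR', 'BMD', 'OT']
--
--     for modality in priority_order:
--         if modality in modality_list:
--             return modality
--
--     return modality_list[0] if modality_list else ""
-- ===== SOURCE B (Python) =====
-- def identify_primary_modality(modality_list):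
--     if not modality_list:
--         return ""
--     priority_order = ['CT', 'MR', 'US', 'XA', 'RF', 'CR', 'BMD', 'OT']
--     rank = {m: i for i, m in enumerate(priority_order)}
--     best = None
--     for m in modality_list:
--         r = rank.get(m)
--         if r is not None and (best is None or r < best):
--             best = r
--     if best is None:
--         return modality_list[0]
--     return priority_order[best]
-- ===== Notes on version B (the rewrite author's own statement) =====
-- stated objective: alternative
-- what changed: Instead of scanning the priority list and doing a membership test over the input for each priority, B builds a rank dictionary once and makes a single pass over the input tracking the minimum rank seen, falling back to modality_list[0] when no element has a rank.
import Mathlib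
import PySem

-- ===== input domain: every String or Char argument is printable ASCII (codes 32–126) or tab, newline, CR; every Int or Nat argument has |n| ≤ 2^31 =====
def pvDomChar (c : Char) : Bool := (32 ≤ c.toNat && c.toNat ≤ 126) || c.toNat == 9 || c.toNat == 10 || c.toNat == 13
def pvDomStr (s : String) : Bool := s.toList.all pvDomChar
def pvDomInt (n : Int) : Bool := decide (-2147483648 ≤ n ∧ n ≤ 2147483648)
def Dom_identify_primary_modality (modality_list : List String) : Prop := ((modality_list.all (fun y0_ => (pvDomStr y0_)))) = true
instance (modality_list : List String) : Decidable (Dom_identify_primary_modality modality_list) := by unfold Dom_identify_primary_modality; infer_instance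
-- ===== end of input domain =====

-- B replaces A's priority-list scan (a membership test over the input per priority)
-- by a rank table and one pass over the input tracking the minimum rank seen (objective: alternative).

-- ===== PORT A =====
-- A's `for modality in priority_order: if modality in modality_list: return modality`
def pvFirstPrio : List String → List String → Option String
  | [], _ => none
  | p :: ps, l => if l.contains p then some p else pvFirstPrio ps l

def identify_primary_modality (modality_list : List String) : String :=
  if modality_list.isEmpty then ""
  else
    match pvFirstPrio ["CT", "MR", "US", "XA", "RF", "CR", "BMD", "OT"] modality_list with
    | some m => m
    | none => if !modality_list.isEmpty then modality_list.headD "" else ""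

-- ===== PORT B =====
-- rank.get(m) for the dict {CT:0, MR:1, US:2, XA:3, RF:4, CR:5, BMD:6, OT:7}
def pvRank (s : String) : Option Nat :=
  if s = "CT" then some 0 else if s = "MR" then some 1 else if s = "US" then some 2
  else if s = "XA" then some 3 else if s = "RF" then some 4 else if s = "CR" then some 5
  else if s = "BMD" then some 6 else if s = "OT" then some 7 else none

-- loop body: best updated when r is not None and (best is None or r < best)
def pvStep (best : Option Nat) (m : String) : Option Nat :=
  match pvRank m with
  | none => best
  | some r =>
    match best with
    | none => some r
    | some b => if r < b then some r else best

-- priority_order[best]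
def pvPrioAt (i : Nat) : String :=
  match i with
  | 0 => "CT" | 1 => "MR" | 2 => "US" | 3 => "XA"
  | 4 => "RF" | 5 => "CR" | 6 => "BMD" | _ => "OT"

def identify_primary_modality_alt (modality_list : List String) : String :=
  if modality_list.isEmpty then ""
  else
    match modality_list.foldl pvStep none with
    | none => modality_list.headD ""
    | some b => pvPrioAt b

-- ===== PRECONDITION & SPEC =====
def Spec_identify_primary_modality (modality_list : List String) (out : String) : Prop := out = identify_primary_modality_alt modality_list
instance (modality_list : List String) (out : String) : Decidable (Spec_identify_primary_modality modality_list out) := by unfold Spec_identify_primary_modality; infer_instance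

-- ===== CLAIM (what is proved, stated in full; the proofs are below) =====
def Claim_equal_identify_primary_modality : Prop := ∀ (modality_list : List String), Dom_identify_primary_modality modality_list → Spec_identify_primary_modality modality_list (identify_primary_modality modality_list)

-- ===== LEMMAS AND PROOFS =====

theorem pvRank_eq_some {s : String} {r : Nat} (h : pvRank s = some r) :
    r < 8 ∧ s = pvPrioAt r := by
  unfold pvRank at h
  split_ifs at h <;> simp_all <;> simp [← h, pvPrioAt]

-- once best = some b, the fold returns some r with r ≤ b
theorem foldl_pvStep_some (l : List String) (b : Nat) :
    ∃ r, l.foldl pvStep (some b) = some r ∧ r ≤ b := by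
  induction l generalizing b with
  | nil => exact ⟨b, rfl, le_refl b⟩
  | cons x xs ih =>
    simp only [List.foldl_cons]
    unfold pvStep
    match hx : pvRank x with
    | none => exact ih b
    | some i =>
      by_cases hi : i < b
      · simp only [hi, if_true]
        obtain ⟨r, hr, hrb⟩ := ih i
        exact ⟨r, hr, by omega⟩
      · simp only [hi, if_false]
        exact ih b

-- if some element with rank i is in l, the fold returns ≤ i (from any start)
theorem foldl_pvStep_le {l : List String} {x : String} {i : Nat}
    (hm : x ∈ l) (hr : pvRank x = some i) :
    ∀ acc, ∃ r, l.foldl pvStep acc = some r ∧ r ≤ i := by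
  induction l with
  | nil => cases hm
  | cons y ys ih =>
    intro acc
    simp only [List.foldl_cons]
    rcases List.mem_cons.mp hm with h | h
    · have hry : pvRank y = some i := h ▸ hr
      have hstep : ∃ r0, pvStep acc y = some r0 ∧ r0 ≤ i := by
        unfold pvStep; rw [hry]
        match acc with
        | none => exact ⟨i, rfl, le_refl i⟩
        | some b =>
          by_cases hb : i < b
          · simp [hb]
          · simp [hb]; omega
      obtain ⟨r0, h0, h0i⟩ := hstep
      rw [h0]
      obtain ⟨r, h1, h2⟩ := foldl_pvStep_some ys r0
      exact ⟨r, h1, by omega⟩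
    · exact ih h (pvStep acc y)

-- if the fold returns some r, either acc was already some r or some element has rank r
theorem foldl_pvStep_mem : ∀ (l : List String) (acc : Option Nat) (r : Nat),
    l.foldl pvStep acc = some r → acc = some r ∨ ∃ x ∈ l, pvRank x = some r := by
  intro l
  induction l with
  | nil => intro acc r h; exact Or.inl h
  | cons y ys ih =>
    intro acc r h
    simp only [List.foldl_cons] at h
    rcases ih (pvStep acc y) r h with h' | ⟨x, hx, hxr⟩
    · unfold pvStep at h'
      match hy : pvRank y with
      | none =>
        rw [hy] at h'; exact Or.inl h'
      | some j =>
        rw [hy] at h'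
        match acc with
        | none =>
          exact Or.inr ⟨y, List.mem_cons_self .., by rw [hy, ← Option.some_inj.mp h']⟩
        | some b =>
          by_cases hb : j < b
          · simp only [hb, if_true] at h'
            exact Or.inr ⟨y, List.mem_cons_self .., by rw [hy, ← Option.some_inj.mp h']⟩
          · simp only [hb, if_false] at h'
            exact Or.inl h'
    · exact Or.inr ⟨x, List.mem_cons_of_mem _ hx, hxr⟩

-- pvPrioAt always lands in the 8 priority strings
theorem pvPrioAt_mem (r : Nat) :
    pvPrioAt r = "CT" ∨ pvPrioAt r = "MR" ∨ pvPrioAt r = "US" ∨ pvPrioAt r = "XA" ∨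
    pvPrioAt r = "RF" ∨ pvPrioAt r = "CR" ∨ pvPrioAt r = "BMD" ∨ pvPrioAt r = "OT" := by
  rcases r with _|_|_|_|_|_|_|_|r <;> simp [pvPrioAt]

-- ===== VERDICT (by name: the statement is the Claim_ definition above) =====
theorem identify_primary_modality_spec : Claim_equal_identify_primary_modality := by
  intro l _
  unfold Spec_identify_primary_modality identify_primary_modality identify_primary_modality_alt
  by_cases hnil : l.isEmpty
  · simp [hnil]
  · simp only [hnil, Bool.not_false]
    -- helper facts
    have hmem : ∀ r, l.foldl pvStep none = some r → pvPrioAt r ∈ l := by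
      intro r h
      rcases foldl_pvStep_mem l none r h with h' | ⟨x, hx, hxr⟩
      · cases h'
      · obtain ⟨_, hx'⟩ := pvRank_eq_some hxr
        rwa [← hx']
    simp only [pvFirstPrio]
    by_cases h0 : "CT" ∈ l
    · obtain ⟨r, hr, hri⟩ := foldl_pvStep_le h0 (by decide : pvRank "CT" = some 0) none
      interval_cases r
      simp [h0, hr, pvPrioAt]
    · simp only [(by simpa using h0 : l.contains "CT" = false), Bool.false_eq_true, if_false]
      by_cases h1 : "MR" ∈ l
      · obtain ⟨r, hr, hri⟩ := foldl_pvStep_le h1 (by decide : pvRank "MR" = some 1) none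
        interval_cases r
        · exact absurd (hmem 0 hr) (by simpa [pvPrioAt] using h0)
        · simp [h1, hr, pvPrioAt]
      · simp only [(by simpa using h1 : l.contains "MR" = false), Bool.false_eq_true, if_false]
        by_cases h2 : "US" ∈ l
        · obtain ⟨r, hr, hri⟩ := foldl_pvStep_le h2 (by decide : pvRank "US" = some 2) none
          interval_cases r
          · exact absurd (hmem 0 hr) (by simpa [pvPrioAt] using h0)
          · exact absurd (hmem 1 hr) (by simpa [pvPrioAt] using h1)
          · simp [h2, hr, pvPrioAt]
        · simp only [(by simpa using h2 : l.contains "US" = false), Bool.false_eq_true, if_false]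
          by_cases h3 : "XA" ∈ l
          · obtain ⟨r, hr, hri⟩ := foldl_pvStep_le h3 (by decide : pvRank "XA" = some 3) none
            interval_cases r
            · exact absurd (hmem 0 hr) (by simpa [pvPrioAt] using h0)
            · exact absurd (hmem 1 hr) (by simpa [pvPrioAt] using h1)
            · exact absurd (hmem 2 hr) (by simpa [pvPrioAt] using h2)
            · simp [h3, hr, pvPrioAt]
          · simp only [(by simpa using h3 : l.contains "XA" = false), Bool.false_eq_true, if_false]
            by_cases h4 : "RF" ∈ l
            · obtain ⟨r, hr, hri⟩ := foldl_pvStep_le h4 (by decide : pvRank "RF" = some 4) none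
              interval_cases r
              · exact absurd (hmem 0 hr) (by simpa [pvPrioAt] using h0)
              · exact absurd (hmem 1 hr) (by simpa [pvPrioAt] using h1)
              · exact absurd (hmem 2 hr) (by simpa [pvPrioAt] using h2)
              · exact absurd (hmem 3 hr) (by simpa [pvPrioAt] using h3)
              · simp [h4, hr, pvPrioAt]
            · simp only [(by simpa using h4 : l.contains "RF" = false), Bool.false_eq_true, if_false]
              by_cases h5 : "CR" ∈ l
              · obtain ⟨r, hr, hri⟩ := foldl_pvStep_le h5 (by decide : pvRank "CR" = some 5) none
                interval_cases r
                · exact absurd (hmem 0 hr) (by simpa [pvPrioAt] using h0)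
                · exact absurd (hmem 1 hr) (by simpa [pvPrioAt] using h1)
                · exact absurd (hmem 2 hr) (by simpa [pvPrioAt] using h2)
                · exact absurd (hmem 3 hr) (by simpa [pvPrioAt] using h3)
                · exact absurd (hmem 4 hr) (by simpa [pvPrioAt] using h4)
                · simp [h5, hr, pvPrioAt]
              · simp only [(by simpa using h5 : l.contains "CR" = false), Bool.false_eq_true, if_false]
                by_cases h6 : "BMD" ∈ l
                · obtain ⟨r, hr, hri⟩ := foldl_pvStep_le h6 (by decide : pvRank "BMD" = some 6) none
                  interval_cases r
                  · exact absurd (hmem 0 hr) (by simpa [pvPrioAt] using h0)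
                  · exact absurd (hmem 1 hr) (by simpa [pvPrioAt] using h1)
                  · exact absurd (hmem 2 hr) (by simpa [pvPrioAt] using h2)
                  · exact absurd (hmem 3 hr) (by simpa [pvPrioAt] using h3)
                  · exact absurd (hmem 4 hr) (by simpa [pvPrioAt] using h4)
                  · exact absurd (hmem 5 hr) (by simpa [pvPrioAt] using h5)
                  · simp [h6, hr, pvPrioAt]
                · simp only [(by simpa using h6 : l.contains "BMD" = false), Bool.false_eq_true, if_false]
                  by_cases h7 : "OT" ∈ l
                  · obtain ⟨r, hr, hri⟩ := foldl_pvStep_le h7 (by decide : pvRank "OT" = some 7) none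
                    interval_cases r
                    · exact absurd (hmem 0 hr) (by simpa [pvPrioAt] using h0)
                    · exact absurd (hmem 1 hr) (by simpa [pvPrioAt] using h1)
                    · exact absurd (hmem 2 hr) (by simpa [pvPrioAt] using h2)
                    · exact absurd (hmem 3 hr) (by simpa [pvPrioAt] using h3)
                    · exact absurd (hmem 4 hr) (by simpa [pvPrioAt] using h4)
                    · exact absurd (hmem 5 hr) (by simpa [pvPrioAt] using h5)
                    · exact absurd (hmem 6 hr) (by simpa [pvPrioAt] using h6)
                    · simp [h7, hr, pvPrioAt]
                  · simp only [(by simpa using h7 : l.contains "OT" = false), Bool.false_eq_true, if_false]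
                    have hnone : l.foldl pvStep none = none := by
                      cases hF : l.foldl pvStep none with
                      | none => rfl
                      | some r =>
                        exfalso
                        have := hmem r hF
                        rcases pvPrioAt_mem r with h|h|h|h|h|h|h|h <;> rw [h] at this <;>
                          first
                          | exact h0 this | exact h1 this | exact h2 this | exact h3 this
                          | exact h4 this | exact h5 this | exact h6 this | exact h7 this
                    simp [hnone]
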